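-- pv_equiv track=rewrite | github.com/protocol66/REU | MCS.py | RepNodes
-- ===== SOURCE A (Python) =====
-- def RepNodes(node, a):
--     if node[0] <= 0:
--         return []
--
--     leftNode = (node[0] - 1, 2 * node[1])
--     rightNode = (node[0] - 1, 2 * node[1] + 1)
--
--     if (node[1] + 1) * (2 ** node[0]) - 1 == a:
--         return [node]
--
--     if (rightNode[1] * (2 ** rightNode[0])) <= a < ((rightNode[1] + 1) * (2 ** rightNode[0])):
--         return [leftNode] + RepNodes(rightNode, a)
--
--     return RepNodes(leftNode, a)
-- ===== SOURCE B (Python) =====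
-- def RepNodes(node, a):
--     # Closed form: node (L,i) covers indices [i*2**L, (i+1)*2**L); the answer is the
--     # greedy cover of the prefix up to a, read off the binary digits of a-start+1
--     # (levels L..1; A never emits level-0 nodes).
--     L, i = node
--     if L <= 0:
--         return []
--     start = i * 2 ** L
--     if a < start or a >= start + 2 ** L:
--         return []
--     n = a - start + 1
--     result = []
--     pos = start
--     for lvl in range(L, 0, -1):
--         if n // 2 ** lvl % 2 == 1:
--             result.append((lvl, pos // 2 ** lvl))
--             pos += 2 ** lvl
--     return result
-- ===== Notes on version B (the rewrite author's own statement) =====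
-- stated objective: alternative
-- what changed: Replaced the recursive tree descent with a closed-form computation: B checks once whether a lies in the node's index range and then reads the answer directly off the binary digits of a-start+1 (levels L..1), with no descent and no per-node case analysis.
import Mathlib
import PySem

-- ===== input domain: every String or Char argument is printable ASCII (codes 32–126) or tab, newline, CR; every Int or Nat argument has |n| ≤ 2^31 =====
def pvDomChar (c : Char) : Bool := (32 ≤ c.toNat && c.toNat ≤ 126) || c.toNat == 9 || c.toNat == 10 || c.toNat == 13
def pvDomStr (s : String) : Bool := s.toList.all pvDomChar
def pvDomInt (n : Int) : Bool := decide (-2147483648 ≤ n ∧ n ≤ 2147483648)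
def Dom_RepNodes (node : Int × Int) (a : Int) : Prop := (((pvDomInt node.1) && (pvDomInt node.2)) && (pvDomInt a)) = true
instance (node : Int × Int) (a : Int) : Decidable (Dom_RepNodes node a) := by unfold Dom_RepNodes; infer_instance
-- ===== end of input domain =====

-- B replaces A's recursive tree descent by a closed form: it reads the answer off the
-- binary digits of a-start+1 (one pass over the levels, no descent); alternative decomposition.

-- ===== PORT A =====
-- literal port of A's recursion; '2 ** node[0]' is only reached with node[0] > 0, so '2 ^ toNat' is exact
def RepNodes (node : Int × Int) (a : Int) : List (Int × Int) :=
  if node.1 ≤ 0 then []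
  else
    let leftNode : Int × Int := (node.1 - 1, 2 * node.2)
    let rightNode : Int × Int := (node.1 - 1, 2 * node.2 + 1)
    if (node.2 + 1) * 2 ^ (node.1).toNat - 1 = a then [node]
    else if rightNode.2 * 2 ^ (rightNode.1).toNat ≤ a ∧ a < (rightNode.2 + 1) * 2 ^ (rightNode.1).toNat then
      leftNode :: RepNodes rightNode a
    else RepNodes leftNode a
termination_by (node.1).toNat
decreasing_by all_goals simp_all

-- ===== PORT B =====
-- the 'for lvl in range(L, 0, -1)' loop of Source B, one constructor per step; 'n // 2**lvl % 2'
-- is ported with '/' '%' which are exact for the positive divisor 2^lvl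
def RepNodesBits (lvl : Nat) (n : Int) (pos : Int) (result : List (Int × Int)) : List (Int × Int) :=
  match lvl with
  | 0 => result
  | l + 1 =>
      if n / 2 ^ (l + 1) % 2 = 1 then
        RepNodesBits l n (pos + 2 ^ (l + 1)) (result ++ [(((l : Int) + 1), pos / 2 ^ (l + 1))])
      else
        RepNodesBits l n pos result

def RepNodes_alt (node : Int × Int) (a : Int) : List (Int × Int) :=
  if node.1 ≤ 0 then []
  else
    let start : Int := node.2 * 2 ^ (node.1).toNat
    if a < start ∨ a ≥ start + 2 ^ (node.1).toNat then []
    else RepNodesBits (node.1).toNat (a - start + 1) start []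

-- ===== PRECONDITION & SPEC =====
def Spec_RepNodes (node : Int × Int) (a : Int) (out : List (Int × Int)) : Prop := out = RepNodes_alt node a
instance (node : Int × Int) (a : Int) (out : List (Int × Int)) : Decidable (Spec_RepNodes node a out) := by unfold Spec_RepNodes; infer_instance

-- ===== CLAIM (what is proved, stated in full; the proofs are below) =====
def Claim_equal_RepNodes : Prop := ∀ (node : Int × Int) (a : Int), Dom_RepNodes node a → Spec_RepNodes node a (RepNodes node a)


-- ===== LEMMAS AND PROOFS =====

-- bits strictly below 2^k don't see an added 2^k
theorem RepNodesBits_add_pow (l : Nat) : ∀ (k : Nat) (n pos : Int) (result : List (Int × Int)),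
    l < k → RepNodesBits l (n + 2 ^ k) pos result = RepNodesBits l n pos result := by
  induction l with
  | zero => intro k n pos result _; rfl
  | succ l ih =>
      intro k n pos result hlk
      have hk : (2 : Int) ^ k = 2 ^ (k - (l + 1)) * 2 ^ (l + 1) := by
        rw [← pow_add]; congr 1; omega
      have hdiv : (n + 2 ^ k) / 2 ^ (l + 1) = n / 2 ^ (l + 1) + 2 ^ (k - (l + 1)) := by
        rw [hk, Int.add_mul_ediv_right _ _ (by positivity)]
      have heven : (2 : Int) ^ (k - (l + 1)) = 2 * 2 ^ (k - (l + 1) - 1) := by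
        rw [← pow_succ']; congr 1; omega
      have hmod : (n + 2 ^ k) / 2 ^ (l + 1) % 2 = n / 2 ^ (l + 1) % 2 := by
        rw [hdiv, heven]; omega
      rw [RepNodesBits, RepNodesBits, hmod]
      split
      · rw [ih k _ _ _ (by omega)]
      · rw [ih k _ _ _ (by omega)]

theorem RepNodesBits_zero (l : Nat) : ∀ (pos : Int) (result : List (Int × Int)),
    RepNodesBits l 0 pos result = result := by
  induction l with
  | zero => intro pos result; rfl
  | succ l ih => intro pos result; rw [RepNodesBits]; norm_num [ih]

-- main invariant: for node (m+1, i) with a inside [i*2^(m+1), (i+1)*2^(m+1)),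
-- the bit loop started with accumulator 'result' returns result ++ A's recursion
theorem RepNodes_inside (m : Nat) : ∀ (i a : Int) (result : List (Int × Int)),
    i * 2 ^ (m + 1) ≤ a → a < (i + 1) * 2 ^ (m + 1) →
    RepNodesBits (m + 1) (a - i * 2 ^ (m + 1) + 1) (i * 2 ^ (m + 1)) result
      = result ++ RepNodes (((m : Int) + 1), i) a := by
  induction m with
  | zero =>
      intro i a result h1 h2
      simp only [Nat.cast_zero]
      have e1 : i * 2 ^ 1 = 2 * i := by ring
      have e2 : (i + 1) * 2 ^ 1 = 2 * i + 2 := by ring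
      rw [e1] at h1; rw [e2] at h2
      rw [RepNodes]
      rw [if_neg (by norm_num)]
      have ht : ((0 : Int) + 1).toNat = 1 := by norm_num
      have ht' : ((0 : Int) + 1 - 1).toNat = 0 := by norm_num
      simp only [ht, ht']
      rcases (by omega : a = 2 * i ∨ a = 2 * i + 1) with ha | ha <;> subst ha
      · -- a = 2i : n = 1, no bit set; A descends left to level 0 and returns []
        rw [if_neg (by intro h; omega), if_neg (by intro h; omega)]
        rw [RepNodes]
        rw [if_pos (by norm_num)]
        rw [RepNodesBits, e1]
        rw [if_neg (by rw [show 2 * i - 2 * i + 1 = 1 from by ring]; decide)]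
        rw [RepNodesBits]
        simp
      · -- a = 2i+1 : n = 2, bit 1 set; A returns [node]
        rw [if_pos (by ring)]
        rw [RepNodesBits, e1]
        rw [show 2 * i + 1 - 2 * i + 1 = 2 from by ring]
        rw [if_pos (by decide)]
        norm_num
        rw [RepNodesBits]
  | succ m ih =>
      intro i a result h1 h2
      push_cast
      have hP : (0 : Int) < 2 ^ (m + 1) := by positivity
      have eA : i * 2 ^ (m + 1 + 1) = 2 * (i * 2 ^ (m + 1)) := by rw [pow_succ]; ring
      have eB : (i + 1) * 2 ^ (m + 1 + 1) = 2 * (i * 2 ^ (m + 1)) + 2 * 2 ^ (m + 1) := by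
        rw [pow_succ]; ring
      have eC : (2 * i + 1) * 2 ^ (m + 1) = 2 * (i * 2 ^ (m + 1)) + 2 ^ (m + 1) := by ring
      have eD : (2 * i + 1 + 1) * 2 ^ (m + 1) = 2 * (i * 2 ^ (m + 1)) + 2 * 2 ^ (m + 1) := by ring
      have eS : (2 : Int) ^ (m + 1 + 1) = 2 * 2 ^ (m + 1) := by rw [pow_succ]; ring
      rw [eA] at h1; rw [eB] at h2
      set t : Int := i * 2 ^ (m + 1) with hts
      set n : Int := a - i * 2 ^ (m + 1 + 1) + 1 with hn
      have hnt : n = a - 2 * t + 1 := by rw [hn, eA]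
      have hn1 : 1 ≤ n := by omega
      have hn2 : n ≤ 2 * 2 ^ (m + 1) := by omega
      -- unfold one step of A
      have htop : RepNodes (((m : Int) + 1 + 1), i) a =
          (if (i + 1) * 2 ^ (m + 1 + 1) - 1 = a then [(((m : Int) + 1 + 1), i)]
           else if (2 * i + 1) * 2 ^ (m + 1) ≤ a ∧ a < (2 * i + 1 + 1) * 2 ^ (m + 1) then
             (((m : Int) + 1), 2 * i) :: RepNodes (((m : Int) + 1), 2 * i + 1) a
           else RepNodes (((m : Int) + 1), 2 * i) a) := by
        rw [RepNodes]
        rw [if_neg (by omega)]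
        have ht1 : (((m : Int) + 1 + 1)).toNat = m + 1 + 1 := by omega
        have ht2 : (((m : Int) + 1 + 1) - 1).toNat = m + 1 := by omega
        simp only [ht1, ht2]
        norm_num
      by_cases hc1 : n = 2 * 2 ^ (m + 1)
      · -- a is the node's last index: A returns [node]; only the top bit of n is set
        have hbit : n / 2 ^ (m + 1 + 1) % 2 = 1 := by
          rw [hc1, ← eS, Int.ediv_self (by positivity)]; decide
        rw [RepNodesBits, if_pos hbit]
        push_cast
        rw [Int.mul_ediv_cancel i (by positivity : (2:Int) ^ (m + 1 + 1) ≠ 0)]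
        have hrest : RepNodesBits (m + 1) n (i * 2 ^ (m + 1 + 1) + 2 ^ (m + 1 + 1))
            (result ++ [(((m : Int) + 1 + 1), i)]) = result ++ [(((m : Int) + 1 + 1), i)] := by
          have h0 := RepNodesBits_add_pow (m + 1) (m + 1 + 1) 0
            (i * 2 ^ (m + 1 + 1) + 2 ^ (m + 1 + 1)) (result ++ [(((m : Int) + 1 + 1), i)])
            (by omega)
          rw [zero_add] at h0
          rw [show (2 : Int) ^ (m + 1 + 1) = n from by rw [hc1, eS]] at h0 ⊢
          rw [h0, RepNodesBits_zero]
        rw [hrest, htop, if_pos (by rw [eB]; omega)]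
      · -- top bit of n is 0
        have hbit0 : n / 2 ^ (m + 1 + 1) % 2 = 0 := by
          rw [Int.ediv_eq_zero_of_lt (by omega) (by rw [eS]; omega)]; decide
        rw [RepNodesBits, if_neg (by rw [hbit0]; decide)]
        by_cases hc2 : 2 ^ (m + 1) < n
        · -- a in the right half: bit m+1 is set and the tail is the right child's loop
          have hq1 : 1 ≤ n / 2 ^ (m + 1) := by
            rw [Int.le_ediv_iff_mul_le hP]; omega
          have hq2 : n / 2 ^ (m + 1) < 2 := by
            rw [Int.ediv_lt_iff_lt_mul hP]; omega
          have hbit1 : n / 2 ^ (m + 1) % 2 = 1 := by omega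
          rw [RepNodesBits, if_pos hbit1]
          rw [show i * 2 ^ (m + 1 + 1) / 2 ^ (m + 1) = 2 * i from by
            rw [show i * 2 ^ (m + 1 + 1) = 2 * i * 2 ^ (m + 1) from by rw [pow_succ]; ring,
              Int.mul_ediv_cancel _ (by positivity)]]
          rw [htop, if_neg (by rw [eB]; omega), if_pos (by rw [eC, eD]; omega)]
          -- the child call, via the induction hypothesis
          have hchild := ih (2 * i + 1) a (result ++ [(((m : Int) + 1), 2 * i)])
            (by rw [eC]; omega) (by rw [eD]; omega)
          rw [show a - (2 * i + 1) * 2 ^ (m + 1) + 1 = n - 2 ^ (m + 1) from by rw [eC]; omega,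
            show (2 * i + 1) * 2 ^ (m + 1) = i * 2 ^ (m + 1 + 1) + 2 ^ (m + 1) from by
              rw [eA, eC]] at hchild
          have hcb : (n - 2 ^ (m + 1)) / 2 ^ (m + 1) % 2 = 0 := by
            rw [Int.ediv_eq_zero_of_lt (by omega) (by omega)]; decide
          rw [RepNodesBits, if_neg (by rw [hcb]; decide)] at hchild
          have hcongr := RepNodesBits_add_pow m (m + 1) (n - 2 ^ (m + 1))
            (i * 2 ^ (m + 1 + 1) + 2 ^ (m + 1)) (result ++ [(((m : Int) + 1), 2 * i)])
            (by omega)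
          rw [show n - 2 ^ (m + 1) + 2 ^ (m + 1) = n from by ring] at hcongr
          rw [hcongr, hchild]
          simp
        · -- a in the left half: same n, same start, descend left
          have hchild := ih (2 * i) a result
            (by rw [show (2 * i) * 2 ^ (m + 1) = 2 * t from by rw [hts]; ring]; omega)
            (by rw [show (2 * i + 1) * 2 ^ (m + 1) = 2 * t + 2 ^ (m + 1) from by rw [hts]; ring]
                omega)
          rw [show a - 2 * i * 2 ^ (m + 1) + 1 = n from by rw [hn]; ring,
            show 2 * i * 2 ^ (m + 1) = i * 2 ^ (m + 1 + 1) from by ring] at hchild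
          rw [hchild, htop, if_neg (by rw [eB]; omega), if_neg (by rw [eC, eD]; omega)]

-- when a lies outside the node's index range, A always descends left and returns []
theorem RepNodes_outside (m : Nat) : ∀ (i a : Int),
    (a < i * 2 ^ m ∨ a ≥ (i + 1) * 2 ^ m) → RepNodes (((m : Int)), i) a = [] := by
  induction m with
  | zero => intro i a _; rw [RepNodes]; simp
  | succ m ih =>
      intro i a hout
      have hP : (0 : Int) < 2 ^ m := by positivity
      have eA : i * 2 ^ (m + 1) = 2 * (i * 2 ^ m) := by rw [pow_succ]; ring
      have eB : (i + 1) * 2 ^ (m + 1) = 2 * (i * 2 ^ m) + 2 * 2 ^ m := by rw [pow_succ]; ring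
      have eC : (2 * i + 1) * 2 ^ m = 2 * (i * 2 ^ m) + 2 ^ m := by ring
      have eD : (2 * i + 1 + 1) * 2 ^ m = 2 * (i * 2 ^ m) + 2 * 2 ^ m := by ring
      rw [eA, eB] at hout
      push_cast
      rw [RepNodes]
      rw [if_neg (by omega)]
      have ht1 : (((m : Int) + 1)).toNat = m + 1 := by omega
      have ht2 : (((m : Int) + 1) - 1).toNat = m := by omega
      simp only [ht1, ht2]
      rw [if_neg (by rw [eB]; omega), if_neg (by rw [eC, eD]; omega)]
      rw [show ((m : Int) + 1 - 1) = (m : Int) from by ring]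
      exact ih (2 * i) a (by
        rw [show (2 * i) * 2 ^ m = 2 * (i * 2 ^ m) from by ring,
          show (2 * i + 1) * 2 ^ m = 2 * (i * 2 ^ m) + 2 ^ m from by ring]
        omega)

-- ===== VERDICT (by name: the statement is the Claim_ definition above) =====
theorem RepNodes_spec : Claim_equal_RepNodes := by
  intro node a _
  unfold Spec_RepNodes RepNodes_alt
  obtain ⟨L, i⟩ := node
  by_cases h0 : L ≤ 0
  · rw [RepNodes]; simp [h0]
  · simp only [h0, if_false]
    by_cases hout : a < i * 2 ^ L.toNat ∨ a ≥ i * 2 ^ L.toNat + 2 ^ L.toNat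
    · rw [if_pos hout]
      have h := RepNodes_outside L.toNat i a (by
        rw [show (i + 1) * 2 ^ L.toNat = i * 2 ^ L.toNat + 2 ^ L.toNat from by ring]
        omega)
      rw [show ((L.toNat : Int)) = L from by omega] at h
      rw [h]
    · rw [if_neg hout]
      have hm : L.toNat - 1 + 1 = L.toNat := by omega
      have h := RepNodes_inside (L.toNat - 1) i a []
        (by rw [hm]; omega)
        (by rw [hm, show (i + 1) * 2 ^ L.toNat = i * 2 ^ L.toNat + 2 ^ L.toNat from by ring]
            omega)
      rw [hm, show (((L.toNat - 1 : Nat) : Int) + 1) = L from by omega] at h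
      rw [h]
      simp
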